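-- pv_equiv track=rewrite | github.com/OrneLibrary/Wilbur | wilbur.py | get_password_length
-- ===== SOURCE A (Python) =====
-- import collections
--
-- def clean_empty_password(matchs):
--     """Cleans empty passwords from the matchs list."""
--     clean_match = list()
--     for match in matchs:
--         if match["password"] and match["password"] != "":
--             clean_match.append(match)
--
--     return clean_match
--
-- def get_password_length(matchs):
--     """Return a dict of password length and the count of that length."""
--     length_count = dict()
--     for match in clean_empty_password(matchs):
--         password_length = len(match["password"])
--         if password_length in length_count.keys():
--             length_count[password_length] += 1
--         else:
--             length_count[password_length] = 1
--
--     # Orders list based on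
--     length_count = collections.OrderedDict(sorted(length_count.items()))
--
--     return length_count
-- ===== SOURCE B (Python) =====
-- import collections
--
-- def get_password_length(matchs):
--     """Return a dict of password length and the count of that length."""
--     # sort-then-group: sort the lengths once, then emit each run as (length, run size)
--     lengths = sorted(len(match["password"]) for match in matchs if match["password"])
--     od = collections.OrderedDict()
--     rest = lengths
--     while rest:
--         head = rest[0]
--         run = 1
--         while run < len(rest) and rest[run] == head:
--             run += 1
--         od[head] = run
--         rest = rest[run:]
--     return od
-- ===== Notes on version B (the rewrite author's own statement) =====
-- stated objective: alternative
-- what changed: Replaces A's hash-dict counting followed by sorting the items with a sort-then-group pass: B sorts the list of password lengths once and scans it, emitting each run of equal lengths as one (length, count) entry in ascending order.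
import Mathlib
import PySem

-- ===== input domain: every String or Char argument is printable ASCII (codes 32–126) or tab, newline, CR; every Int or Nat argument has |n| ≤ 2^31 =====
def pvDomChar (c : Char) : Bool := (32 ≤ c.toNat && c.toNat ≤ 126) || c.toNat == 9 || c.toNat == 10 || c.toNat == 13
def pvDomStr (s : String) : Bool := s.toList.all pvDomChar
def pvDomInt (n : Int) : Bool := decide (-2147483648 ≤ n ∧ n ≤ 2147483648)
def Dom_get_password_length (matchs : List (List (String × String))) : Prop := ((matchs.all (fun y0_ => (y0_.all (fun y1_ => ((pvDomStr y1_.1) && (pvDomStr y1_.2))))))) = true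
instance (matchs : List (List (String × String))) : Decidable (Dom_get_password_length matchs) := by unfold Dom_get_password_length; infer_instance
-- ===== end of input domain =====

-- B counts by sorting the password lengths once and grouping equal runs, instead of A's
-- hash-dict tally followed by sorting the items; same return value.

-- ===== PORT A =====
-- match["password"]: under Pre_ the key is present, so getD with any default is exact
def pvPw (m : List (String × String)) : String := (PySem.Dict.mk m).getD "password" ""

def clean_empty_password (matchs : List (List (String × String))) : List (List (String × String)) :=
  matchs.foldl (fun clean m => if pvPw m ≠ "" ∧ pvPw m ≠ "" then clean ++ [m] else clean) []

def get_password_length (matchs : List (List (String × String))) : List (Int × Int) :=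
  let length_count : PySem.Dict Int Int :=
    (clean_empty_password matchs).foldl (fun d m =>
      let pl : Int := PySem.Str.len (pvPw m)
      if d.contains pl then d.insert pl (d.getD pl 0 + 1) else d.insert pl 1)
      PySem.Dict.empty
  PySem.List.sorted2 length_count.items (fun p => p.1) (fun p => p.2)

-- ===== PORT B =====
-- the outer while loop of B: emit (head, run length), continue on rest[run:]
def pvRunsB : List Int → List (Int × Int)
  | [] => []
  | x :: t =>
    (x, 1 + ((t.takeWhile (fun y => y == x)).length : Int)) ::
      pvRunsB (t.dropWhile (fun y => y == x))
  termination_by s => s.length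
  decreasing_by simpa using Nat.lt_succ_of_le (List.length_dropWhile_le _ t)

def get_password_length_alt (matchs : List (List (String × String))) : List (Int × Int) :=
  let lengths := PySem.List.sorted
    ((matchs.filter (fun m => pvPw m != "")).map (fun m => PySem.Str.len (pvPw m)))
    (fun x => x) false
  pvRunsB lengths

-- ===== PRECONDITION & SPEC =====
-- Pre_ excludes exactly the inputs where some match lacks the "password" key: A raises KeyError there.
def Pre_get_password_length (matchs : List (List (String × String))) : Prop :=
  (matchs.all (fun m => (PySem.Dict.mk m).contains "password")) = true
instance (matchs : List (List (String × String))) : Decidable (Pre_get_password_length matchs) := by unfold Pre_get_password_length; infer_instance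
def pvWitness_get_password_length : (List (List (String × String))) :=
  [[("password", "ab")], [("password", "")], [("user", "bob"), ("password", "abc")], [("password", "xy")]]
def Spec_get_password_length (matchs : List (List (String × String))) (out : List (Int × Int)) : Prop := out = get_password_length_alt matchs
instance (matchs : List (List (String × String))) (out : List (Int × Int)) : Decidable (Spec_get_password_length matchs out) := by unfold Spec_get_password_length; infer_instance

-- ===== CLAIM (what is proved, stated in full; the proofs are below) =====
def Claim_equal_get_password_length : Prop := ∀ (matchs : List (List (String × String))), Dom_get_password_length matchs → Pre_get_password_length matchs → Spec_get_password_length matchs (get_password_length matchs)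

-- ===== LEMMAS AND PROOFS =====

-- A's clean pass is the boolean filter
theorem pv_clean_eq (matchs : List (List (String × String))) :
    clean_empty_password matchs = matchs.filter (fun m => pvPw m != "") := by
  unfold clean_empty_password
  have h : (fun (clean : List (List (String × String))) m =>
      if pvPw m ≠ "" ∧ pvPw m ≠ "" then clean ++ [m] else clean)
      = fun clean m => if (pvPw m != "") = true then clean ++ [id m] else clean := by
    funext clean m
    by_cases h : pvPw m = "" <;> simp [h]
  rw [h, PySem.List.foldl_append_if]
  simp

-- A's tally loop is Counter of the list of kept password lengths
theorem pv_dict_eq (matchs : List (List (String × String))) :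
    (clean_empty_password matchs).foldl (fun d m =>
      let pl : Int := PySem.Str.len (pvPw m)
      if d.contains pl then d.insert pl (d.getD pl 0 + 1) else d.insert pl 1)
      PySem.Dict.empty
    = PySem.Dict.counter ((matchs.filter (fun m => pvPw m != "")).map (fun m => PySem.Str.len (pvPw m))) := by
  rw [pv_clean_eq, ← PySem.Dict.foldl_insert_getD_add_one_eq_counter, List.foldl_map]
  have hfun : (fun (d : PySem.Dict Int Int) m =>
      let pl : Int := PySem.Str.len (pvPw m)
      if d.contains pl then d.insert pl (d.getD pl 0 + 1) else d.insert pl 1)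
      = fun (d : PySem.Dict Int Int) m => d.insert (PySem.Str.len (pvPw m)) (d.getD (PySem.Str.len (pvPw m)) 0 + 1) := by
    funext d m
    show (if d.contains (PySem.Str.len (pvPw m)) = true
        then d.insert (PySem.Str.len (pvPw m)) (d.getD (PySem.Str.len (pvPw m)) 0 + 1)
        else d.insert (PySem.Str.len (pvPw m)) 1) = _
    by_cases hc : d.contains (PySem.Str.len (pvPw m)) = true
    · rw [if_pos hc]
    · rw [if_neg hc, PySem.Dict.getD_of_not_contains d 0 (by simpa using hc)]
      norm_num
  rw [hfun]

-- generic congruence for the insertion-sort fold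
theorem pv_insertBy_congr {α : Type} (b1 b2 : α → α → Bool) (x : α) (acc : List α)
    (h : ∀ y ∈ acc, b1 x y = b2 x y) :
    PySem.List.insertBy b1 x acc = PySem.List.insertBy b2 x acc := by
  induction acc with
  | nil => rfl
  | cons y ys ih =>
    simp only [PySem.List.insertBy]
    rw [h y (by simp)]
    split
    · rfl
    · rw [ih (fun z hz => h z (by simp [hz]))]

theorem pv_foldl_insertBy_congr {α : Type} (b1 b2 : α → α → Bool) (S : List α)
    (h : ∀ a ∈ S, ∀ b ∈ S, b1 a b = b2 a b) :
    ∀ (xs acc : List α), (∀ x ∈ xs, x ∈ S) → (∀ y ∈ acc, y ∈ S) →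
      xs.foldl (fun acc x => PySem.List.insertBy b1 x acc) acc
        = xs.foldl (fun acc x => PySem.List.insertBy b2 x acc) acc := by
  intro xs
  induction xs with
  | nil => intro acc _ _; rfl
  | cons x t ih =>
    intro acc hxs hacc
    simp only [List.foldl_cons]
    rw [pv_insertBy_congr b1 b2 x acc (fun y hy => h x (hxs x (by simp)) y (hacc y hy))]
    exact ih _ (fun z hz => hxs z (by simp [hz]))
      (fun y hy => by
        rcases (PySem.List.mem_insertBy b2 x y acc).1 hy with rfl | hy
        · exact hxs y (by simp)
        · exact hacc y hy)

-- sorting pairs lexicographically = sorting by first component, when firsts are tie-free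
theorem pv_sorted2_eq_sorted (xs : List (Int × Int))
    (hinj : ∀ a ∈ xs, ∀ b ∈ xs, a.1 = b.1 → a = b) :
    PySem.List.sorted2 xs (fun p => p.1) (fun p => p.2)
      = PySem.List.sorted xs (fun p => p.1) := by
  show xs.foldl (fun acc x => PySem.List.insertBy _ x acc) []
      = xs.foldl (fun acc x => PySem.List.insertBy _ x acc) []
  apply pv_foldl_insertBy_congr _ _ xs _ xs [] (fun x hx => hx) (by simp)
  intro a ha b hb
  by_cases h1 : a.1 < b.1
  · simp [h1]
  · by_cases h2 : b.1 < a.1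
    · simp [h1, h2]
    · have hab : a.1 = b.1 := le_antisymm (not_lt.1 h2) (not_lt.1 h1)
      have hab' := hinj a ha b hb hab
      subst hab'
      simp

-- every element after the first run is strictly greater than the head (sorted input)
theorem pv_drop_gt (x : Int) (t : List Int) (hs : (x :: t).Pairwise (· ≤ ·)) :
    ∀ z ∈ t.dropWhile (fun y => y == x), x < z := by
  rcases List.pairwise_cons.1 hs with ⟨hx, ht⟩
  intro z hz
  cases hd : t.dropWhile (fun y => y == x) with
  | nil => simp [hd] at hz
  | cons y d' =>
    have hy_ne : (y == x) = false := by
      have h := List.head?_dropWhile_not (fun y => y == x) t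
      rw [hd] at h; simpa only [List.head?_cons] using h
    have hyt : y ∈ t := (List.dropWhile_sublist _).mem (by rw [hd]; exact List.mem_cons_self ..)
    have hxy : x < y := lt_of_le_of_ne (hx y hyt) (by simpa using (Ne.symm (by simpa using hy_ne)))
    rw [hd] at hz
    rcases List.mem_cons.1 hz with rfl | hz'
    · exact hxy
    · have hpd : (y :: d').Pairwise (· ≤ ·) := by
        rw [← hd]; exact ht.sublist (List.dropWhile_sublist _)
      exact lt_of_lt_of_le hxy ((List.pairwise_cons.1 hpd).1 z hz')

theorem pv_count_head (x : Int) (t : List Int) (hs : (x :: t).Pairwise (· ≤ ·)) :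
    List.count x (x :: t) = (t.takeWhile (fun y => y == x)).length + 1 := by
  have h1 : List.count x (t.takeWhile (fun y => y == x)) = (t.takeWhile (fun y => y == x)).length := by
    apply List.count_eq_length.2
    intro b hb
    have hbx : (b == x) = true := List.mem_takeWhile_imp (p := fun y => y == x) hb
    exact (eq_of_beq hbx).symm
  have h2 : List.count x (t.dropWhile (fun y => y == x)) = 0 := by
    apply List.count_eq_zero.2
    intro hx
    exact absurd rfl (ne_of_gt (pv_drop_gt x t hs x hx))
  calc List.count x (x :: t) = List.count x t + 1 := List.count_cons_self
    _ = _ := by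
        conv_lhs => rw [← List.takeWhile_append_dropWhile (p := fun y => y == x) (l := t)]
        rw [List.count_append, h1, h2]

theorem pv_count_tail (x : Int) (t : List Int) (k : Int) (hk : k ≠ x) :
    List.count k (x :: t) = List.count k (t.dropWhile (fun y => y == x)) := by
  have h1 : List.count k (t.takeWhile (fun y => y == x)) = 0 := by
    apply List.count_eq_zero.2
    intro hkmem
    have hbx : (k == x) = true := List.mem_takeWhile_imp (p := fun y => y == x) hkmem
    exact hk (eq_of_beq hbx)
  rw [List.count_cons, ← List.takeWhile_append_dropWhile (p := fun y => y == x) (l := t),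
    List.count_append, h1]
  simp [Ne.symm hk]

-- characterisation of B's grouping pass on a sorted list
theorem pv_mem_runs (s : List Int) (hs : s.Pairwise (· ≤ ·)) :
    ∀ p : Int × Int, p ∈ pvRunsB s ↔ p.1 ∈ s ∧ p.2 = (List.count p.1 s : Int) := by
  induction s using pvRunsB.induct with
  | case1 => simp [pvRunsB]
  | case2 x t ih =>
    have hd : (t.dropWhile (fun y => y == x)).Pairwise (· ≤ ·) :=
      (List.pairwise_cons.1 hs).2.sublist (List.dropWhile_sublist _)
    have hgt := pv_drop_gt x t hs
    intro p
    rw [pvRunsB]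
    simp only [List.mem_cons, ih hd p]
    constructor
    · rintro (rfl | ⟨hp1, hp2⟩)
      · refine ⟨by simp, ?_⟩
        rw [pv_count_head x t hs]; push_cast; ring
      · have hne : p.1 ≠ x := ne_of_gt (hgt p.1 hp1)
        refine ⟨Or.inr ((List.dropWhile_sublist _).mem hp1), ?_⟩
        rw [pv_count_tail x t p.1 hne, hp2]
    · rintro ⟨hp1, hp2⟩
      by_cases hx : p.1 = x
      · left
        have hp2' : p.2 = 1 + ((t.takeWhile (fun y => y == x)).length : Int) := by
          rw [hp2, hx, pv_count_head x t hs]; push_cast; ring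
        calc p = (p.1, p.2) := rfl
          _ = _ := by rw [hx, hp2']
      · right
        have hp1t : p.1 ∈ t := by rcases hp1 with h | h; exact absurd h hx; exact h
        have hp1d : p.1 ∈ t.dropWhile (fun y => y == x) := by
          conv at hp1t => rw [← List.takeWhile_append_dropWhile (p := fun y => y == x) (l := t)]
          rcases List.mem_append.1 hp1t with h | h
          · exact absurd (by simpa using List.mem_takeWhile_imp h) hx
          · exact h
        exact ⟨hp1d, by rw [hp2, pv_count_tail x t p.1 hx]⟩

theorem pv_runs_pairwise (s : List Int) (hs : s.Pairwise (· ≤ ·)) :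
    (pvRunsB s).Pairwise (fun a b => a.1 < b.1) := by
  induction s using pvRunsB.induct with
  | case1 => simp [pvRunsB]
  | case2 x t ih =>
    have hd : (t.dropWhile (fun y => y == x)).Pairwise (· ≤ ·) :=
      (List.pairwise_cons.1 hs).2.sublist (List.dropWhile_sublist _)
    rw [pvRunsB]
    refine List.pairwise_cons.2 ⟨?_, ih hd⟩
    intro q hq
    exact pv_drop_gt x t hs q.1 ((pv_mem_runs _ hd q).1 hq).1

-- ===== VERDICT (by name: the statement is the Claim_ definition above) =====
theorem get_password_length_spec : Claim_equal_get_password_length := by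
  intro matchs _ _
  unfold Spec_get_password_length get_password_length get_password_length_alt
  rw [pv_dict_eq]
  set L : List Int := (matchs.filter (fun m => pvPw m != "")).map (fun m => PySem.Str.len (pvPw m)) with hL
  set S : List Int := PySem.List.sorted L (fun x => x) false with hSdef
  have hS : S.Pairwise (· ≤ ·) := PySem.List.sorted_pairwise L (fun x => x)
  show PySem.List.sorted2 (PySem.Dict.counter L).items (fun p => p.1) (fun p => p.2) = pvRunsB S
  rw [PySem.Dict.items_counter]
  set items : List (Int × Int) := (PySem.Set.ofList L).map (fun k => (k, (List.count k L : Int))) with hitems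
  have hinj : ∀ a ∈ items, ∀ b ∈ items, a.1 = b.1 → a = b := by
    intro a ha b hb hab
    rw [hitems] at ha hb
    rcases List.mem_map.1 ha with ⟨k, _, rfl⟩
    rcases List.mem_map.1 hb with ⟨k', _, rfl⟩
    simp only at hab
    rw [hab]
  rw [pv_sorted2_eq_sorted items hinj]
  have hmemiff : ∀ p : Int × Int, p ∈ pvRunsB S ↔ p ∈ items := by
    intro p
    rw [pv_mem_runs S hS p, hitems]
    have hcnt : List.count p.1 S = List.count p.1 L :=
      (PySem.List.sorted_perm L (fun x => x) false).count_eq p.1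
    rw [hSdef, PySem.List.mem_sorted, ← hSdef, hcnt]
    constructor
    · rintro ⟨h1, h2⟩
      exact List.mem_map.2 ⟨p.1, (PySem.Set.mem_ofList L p.1).2 h1,
        by rw [← h2]⟩
    · intro hp
      rcases List.mem_map.1 hp with ⟨k, hk, rfl⟩
      exact ⟨(PySem.Set.mem_ofList L k).1 hk, rfl⟩
  have hnd1 : (pvRunsB S).Nodup :=
    (pv_runs_pairwise S hS).imp (fun h => fun he => absurd (he ▸ h) (lt_irrefl _))
  have hnd2 : items.Nodup := by
    rw [hitems]
    exact (PySem.Set.nodup_ofList L).map (fun a b h => congrArg Prod.fst h)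
  have hperm : (pvRunsB S).Perm items :=
    (List.perm_ext_iff_of_nodup hnd1 hnd2).2 hmemiff
  exact PySem.List.sorted_eq_of_perm_of_pairwise_lt items (pvRunsB S) (fun p => p.1)
    hperm (pv_runs_pairwise S hS)
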